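-- pv_equiv track=rewrite | github.com/Plawn/petit_publipost_gateway | app old/better_publiposting/utils.py | xml_cleaner
-- ===== SOURCE A (Python) =====
-- from typing import Dict, List, Generator, Iterable
--
-- def xml_cleaner(words: Iterable) -> Generator[str, None, None]:
--     """Enlève les tags XML résiduels pour une liste de mots"""
--     for word in words:
--         chars = list()
--         in_tag = False
--         for char in word:
--             if char == "<":
--                 in_tag = True
--             elif char == ">":
--                 in_tag = False
--             elif not in_tag:
--                 chars.append(char)
--         yield ''.join(chars)
-- ===== SOURCE B (Python) =====
-- import re
--
-- _TAG = re.compile(r'<[^>]*>?|>')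
--
-- def xml_cleaner(words):
--     """Enlève les tags XML résiduels pour une liste de mots"""
--     for word in words:
--         yield _TAG.sub('', word)
-- ===== Notes on version B (the rewrite author's own statement) =====
-- stated objective: idiomatic
-- what changed: Replaced the hand-written per-character in_tag state machine with a single precompiled regex substitution (r'<[^>]*>?|>') per word, moving the scan into the regex engine.
import Mathlib
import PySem

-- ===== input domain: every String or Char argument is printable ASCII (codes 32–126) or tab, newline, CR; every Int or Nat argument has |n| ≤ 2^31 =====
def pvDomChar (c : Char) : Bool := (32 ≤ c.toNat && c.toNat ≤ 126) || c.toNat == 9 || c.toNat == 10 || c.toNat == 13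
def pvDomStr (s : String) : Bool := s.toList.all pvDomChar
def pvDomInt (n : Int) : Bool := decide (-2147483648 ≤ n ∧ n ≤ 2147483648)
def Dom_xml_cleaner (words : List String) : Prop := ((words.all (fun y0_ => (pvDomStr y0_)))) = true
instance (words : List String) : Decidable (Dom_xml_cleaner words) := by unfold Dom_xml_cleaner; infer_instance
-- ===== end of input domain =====

-- B replaces A's per-character in_tag state machine with one regex substitution per word (idiomatic; same cost).

-- ===== PORT A =====
-- loop over chars with the in_tag flag and the accumulated chars (reversed accumulator, reversed at the end)
def xmlALoop : List Char → Bool → List Char → List Char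
  | [], _, acc => acc.reverse
  | c :: rest, inTag, acc =>
    if c = '<' then xmlALoop rest true acc
    else if c = '>' then xmlALoop rest false acc
    else if !inTag then xmlALoop rest inTag (c :: acc)
    else xmlALoop rest inTag acc

def xml_cleaner (words : List String) : List String :=
  words.map (fun w => String.ofList (xmlALoop w.toList false []))

-- ===== PORT B =====
-- hand port of re.sub(r'<[^>]*>?|>', '', word): leftmost-longest scan — at '<' drop through
-- the next '>' (or to end of string), a bare '>' is dropped, every other char is kept.
def xmlDropTag : List Char → List Char
  | [] => []
  | c :: rest => if c = '>' then rest else xmlDropTag rest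

theorem xmlDropTag_length_le : ∀ cs : List Char, (xmlDropTag cs).length ≤ cs.length := by
  intro cs
  induction cs with
  | nil => simp [xmlDropTag]
  | cons c rest ih =>
    simp only [xmlDropTag]
    split
    · simp
    · exact Nat.le_trans ih (Nat.le_succ _)

def xmlSub : List Char → List Char
  | [] => []
  | c :: rest =>
    if c = '<' then xmlSub (xmlDropTag rest)
    else if c = '>' then xmlSub rest
    else c :: xmlSub rest
termination_by cs => cs.length
decreasing_by
  · exact Nat.lt_succ_of_le (xmlDropTag_length_le rest)
  · simp
  · simp

def xml_cleaner_alt (words : List String) : List String :=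
  words.map (fun w => String.ofList (xmlSub w.toList))

-- ===== PRECONDITION & SPEC =====
def Spec_xml_cleaner (words : List String) (out : List String) : Prop := out = xml_cleaner_alt words
instance (words : List String) (out : List String) : Decidable (Spec_xml_cleaner words out) := by unfold Spec_xml_cleaner; infer_instance

-- ===== CLAIM (what is proved, stated in full; the proofs are below) =====
def Claim_equal_xml_cleaner : Prop := ∀ (words : List String), Dom_xml_cleaner words → Spec_xml_cleaner words (xml_cleaner words)

-- ===== LEMMAS AND PROOFS =====

-- inside a tag, A just scans for the closing '>'
theorem xmlALoop_true (cs : List Char) : ∀ acc, xmlALoop cs true acc = xmlALoop (xmlDropTag cs) false acc := by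
  induction cs with
  | nil => intro acc; rfl
  | cons c rest ih =>
    intro acc
    by_cases h1 : c = '<'
    · simp [xmlALoop, xmlDropTag, h1, ih]
    · by_cases h2 : c = '>'
      · simp [xmlALoop, xmlDropTag, h2]
      · simp [xmlALoop, xmlDropTag, h1, h2, ih]

theorem xmlALoop_eq_sub (n : ℕ) : ∀ cs : List Char, cs.length ≤ n → ∀ acc, xmlALoop cs false acc = acc.reverse ++ xmlSub cs := by
  induction n with
  | zero =>
    intro cs h acc
    have : cs = [] := List.eq_nil_of_length_eq_zero (Nat.le_zero.mp h)
    simp [this, xmlALoop, xmlSub]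
  | succ n ih =>
    intro cs h acc
    match cs with
    | [] => simp [xmlALoop, xmlSub]
    | c :: rest =>
      have hr : rest.length ≤ n := Nat.lt_succ_iff.mp (Nat.lt_of_lt_of_le (by simp) h)
      by_cases h1 : c = '<'
      · have hd : (xmlDropTag rest).length ≤ n := Nat.le_trans (xmlDropTag_length_le rest) hr
        simp [xmlALoop, xmlSub, h1, xmlALoop_true, ih _ hd]
      · by_cases h2 : c = '>'
        · simp [xmlALoop, xmlSub, h2, ih _ hr]
        · simp [xmlALoop, xmlSub, h1, h2, ih _ hr]

-- ===== VERDICT (by name: the statement is the Claim_ definition above) =====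
theorem xml_cleaner_spec : Claim_equal_xml_cleaner := by
  intro words _
  unfold Spec_xml_cleaner xml_cleaner xml_cleaner_alt
  refine List.map_congr_left (fun w _ => ?_)
  rw [xmlALoop_eq_sub w.toList.length w.toList (Nat.le_refl _) []]
  simp
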